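-- pv_equiv track=rewrite | github.com/bhanuprasanna2001/DL_from_scratch | LSTM/name_gen.py | pronounceable_heuristic
-- ===== SOURCE A (Python) =====
-- VOWELS = set(list("aeiouy"))
--
-- def pronounceable_heuristic(name, max_cons_run=3, max_vowel_run=3):
--     if len(name) == 0:
--         return False
--     if not any(ch in VOWELS for ch in name):
--         return False
--
--     max_c = 0
--     max_v = 0
--     c_run = 0
--     v_run = 0
--
--     for ch in name.lower():
--         if ch in VOWELS:
--             v_run += 1
--             c_run = 0
--         else:
--             c_run += 1
--             v_run = 0
--         max_c = max(max_c, c_run)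
--         max_v = max(max_v, v_run)
--
--     if max_c > max_cons_run:
--         return False
--     if max_v > max_vowel_run:
--         return False
--
--     # Optional: avoid triple repeated letters
--     for i in range(len(name) - 2):
--         if name[i] == name[i+1] == name[i+2]:
--             return False
--
--     return True
-- ===== SOURCE B (Python) =====
-- VOWELS = frozenset("aeiouy")
--
-- def pronounceable_heuristic(name, max_cons_run=3, max_vowel_run=3):
--     if not name:
--         return False
--     if all(ch not in VOWELS for ch in name):
--         return False
--
--     # consume the lowercased name run by run, keeping the longest run of each kind
--     low = name.lower()
--     n = len(low)
--     max_c = 0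
--     max_v = 0
--     i = 0
--     while i < n:
--         is_v = low[i] in VOWELS
--         j = i + 1
--         while j < n and (low[j] in VOWELS) == is_v:
--             j += 1
--         if is_v:
--             max_v = max(max_v, j - i)
--         else:
--             max_c = max(max_c, j - i)
--         i = j
--     if max_c > max_cons_run or max_v > max_vowel_run:
--         return False
--
--     # no run of three or more identical characters in the original name
--     m = len(name)
--     i = 0
--     while i < m:
--         j = i + 1
--         while j < m and name[j] == name[i]:
--             j += 1
--         if j - i >= 3:
--             return False
--         i = j
--     return True
-- ===== Notes on version B (the rewrite author's own statement) =====
-- stated objective: alternative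
-- what changed: A's per-character state machine with four running counters (and its index-window triple scan) is replaced by a run-by-run scan: each maximal vowel/consonant run (and each run of identical letters) is consumed wholesale with two pointers and only the run maxima are kept.
import Mathlib
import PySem

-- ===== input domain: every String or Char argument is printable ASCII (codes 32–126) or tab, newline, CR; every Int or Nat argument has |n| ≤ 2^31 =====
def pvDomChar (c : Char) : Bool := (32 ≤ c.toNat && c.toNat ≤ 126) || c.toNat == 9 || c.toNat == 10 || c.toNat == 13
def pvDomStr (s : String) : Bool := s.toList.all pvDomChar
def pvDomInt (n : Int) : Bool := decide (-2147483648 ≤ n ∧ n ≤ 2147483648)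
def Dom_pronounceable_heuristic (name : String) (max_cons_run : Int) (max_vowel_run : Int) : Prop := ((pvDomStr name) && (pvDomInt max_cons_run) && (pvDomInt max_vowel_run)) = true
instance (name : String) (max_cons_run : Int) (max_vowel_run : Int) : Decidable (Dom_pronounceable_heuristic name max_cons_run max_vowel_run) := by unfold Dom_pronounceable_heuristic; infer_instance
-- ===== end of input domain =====

-- B rewrites A's per-character run-counter state machine as a run-by-run scan
-- (consume each maximal vowel/consonant run wholesale, then each run of equal
-- letters for the triple rule); objective: alternative decomposition, same cost.

-- ===== PORT A =====
-- VOWELS = set(list("aeiouy")) (used only for membership tests)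
def pvVowels : List Char := ['a', 'e', 'i', 'o', 'u', 'y']

-- one iteration of A's for-loop over (max_c, max_v, c_run, v_run)
def pvStepA (s : Int × Int × Int × Int) (ch : Char) : Int × Int × Int × Int :=
  let (mc, mv, c, v) := s
  if pvVowels.contains ch then
    (max mc 0, max mv (v + 1), 0, v + 1)
  else
    (max mc (c + 1), max mv 0, c + 1, 0)

def pronounceable_heuristic (name : String) (max_cons_run : Int) (max_vowel_run : Int) : Bool :=
  let l := name.toList
  if l.isEmpty then false
  else if !(l.any fun ch => pvVowels.contains ch) then false
  else
    let st := (PySem.Chars.lower l).foldl pvStepA ((0 : Int), (0 : Int), (0 : Int), (0 : Int))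
    if st.1 > max_cons_run then false
    else if st.2.1 > max_vowel_run then false
    else if (PySem.List.pyRange 0 (PySem.List.len l - 2) 1).any (fun i =>
        (PySem.List.pyGet? l i == PySem.List.pyGet? l (i + 1)) &&
        (PySem.List.pyGet? l (i + 1) == PySem.List.pyGet? l (i + 2))) then false
    else true

-- ===== PORT B =====
-- B's outer while-loop: consume one maximal same-kind run per step, keep the maxima
def pvMaxRuns : List Char → Int → Int → Int × Int
  | [], mc, mv => (mc, mv)
  | ch :: rest, mc, mv =>
    let isV := pvVowels.contains ch
    let t := rest.takeWhile fun x => pvVowels.contains x == isV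
    let r := rest.dropWhile fun x => pvVowels.contains x == isV
    if isV then pvMaxRuns r mc (max mv (1 + t.length))
    else pvMaxRuns r (max mc (1 + t.length)) mv
termination_by l => l.length
decreasing_by all_goals (simp only [List.length_cons]; exact Nat.lt_succ_of_le (List.length_dropWhile_le _ _))

-- B's second while-loop: runs of identical characters, none of length ≥ 3
def pvTripleFree : List Char → Bool
  | [] => true
  | ch :: rest =>
    if 3 ≤ 1 + (rest.takeWhile fun x => x == ch).length then false
    else pvTripleFree (rest.dropWhile fun x => x == ch)
termination_by l => l.length
decreasing_by all_goals (simp only [List.length_cons]; exact Nat.lt_succ_of_le (List.length_dropWhile_le _ _))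

def pronounceable_heuristic_alt (name : String) (max_cons_run : Int) (max_vowel_run : Int) : Bool :=
  let l := name.toList
  if l = [] then false
  else if l.all (fun ch => !(pvVowels.contains ch)) then false
  else
    let p := pvMaxRuns (PySem.Chars.lower l) 0 0
    if p.1 > max_cons_run || p.2 > max_vowel_run then false
    else pvTripleFree l

-- ===== PRECONDITION & SPEC =====
def Spec_pronounceable_heuristic (name : String) (max_cons_run : Int) (max_vowel_run : Int) (out : Bool) : Prop := out = pronounceable_heuristic_alt name max_cons_run max_vowel_run
instance (name : String) (max_cons_run : Int) (max_vowel_run : Int) (out : Bool) : Decidable (Spec_pronounceable_heuristic name max_cons_run max_vowel_run out) := by unfold Spec_pronounceable_heuristic; infer_instance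

-- ===== CLAIM (what is proved, stated in full; the proofs are below) =====
def Claim_equal_pronounceable_heuristic : Prop := ∀ (name : String) (max_cons_run : Int) (max_vowel_run : Int), Dom_pronounceable_heuristic name max_cons_run max_vowel_run → Spec_pronounceable_heuristic name max_cons_run max_vowel_run (pronounceable_heuristic name max_cons_run max_vowel_run)

-- ===== LEMMAS AND PROOFS =====

-- A's for-loop over a block of consonants: the run counter just accumulates
theorem pv_fold_cons (t : List Char) (h : ∀ x ∈ t, pvVowels.contains x = false) :
    ∀ mc mv c : Int, 0 ≤ mv → c ≤ mc →
      t.foldl pvStepA (mc, mv, c, 0) = (max mc (c + t.length), mv, c + t.length, 0) := by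
  induction t with
  | nil => intro mc mv c _ hc; simp [max_eq_left hc]
  | cons x t ih =>
    intro mc mv c hmv hc
    have hx : pvVowels.contains x = false := h x (by simp)
    have ht : ∀ y ∈ t, pvVowels.contains y = false := fun y hy => h y (by simp [hy])
    have := ih ht (max mc (c + 1)) mv (c + 1) hmv (le_max_right _ _)
    simp only [List.foldl_cons, pvStepA, hx, Bool.false_eq_true, if_false,
      max_eq_left hmv, this, List.length_cons]
    simp only [Prod.mk.injEq]
    refine ⟨by push_cast; omega, trivial, by push_cast; omega, trivial⟩

theorem pv_fold_vow (t : List Char) (h : ∀ x ∈ t, pvVowels.contains x = true) :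
    ∀ mc mv v : Int, 0 ≤ mc → v ≤ mv →
      t.foldl pvStepA (mc, mv, 0, v) = (mc, max mv (v + t.length), 0, v + t.length) := by
  induction t with
  | nil => intro mc mv v _ hv; simp [max_eq_left hv]
  | cons x t ih =>
    intro mc mv v hmc hv
    have hx : pvVowels.contains x = true := h x (by simp)
    have ht : ∀ y ∈ t, pvVowels.contains y = true := fun y hy => h y (by simp [hy])
    have := ih ht mc (max mv (v + 1)) (v + 1) hmc (le_max_right _ _)
    simp only [List.foldl_cons, pvStepA, hx, if_true, max_eq_left hmc, this, List.length_cons]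
    simp only [Prod.mk.injEq]
    refine ⟨trivial, by push_cast; omega, trivial, by push_cast; omega⟩

-- the run-by-run scan computes exactly the two maxima of A's fold
theorem pv_main (l : List Char) :
    ∀ mc mv c v : Int, 0 ≤ mc → 0 ≤ mv →
      (∀ x rest, l = x :: rest → (if pvVowels.contains x then v = 0 else c = 0)) →
      ((l.foldl pvStepA (mc, mv, c, v)).1, (l.foldl pvStepA (mc, mv, c, v)).2.1)
        = pvMaxRuns l mc mv := by
  cases l with
  | nil => intro mc mv c v _ _ _; simp [pvMaxRuns]
  | cons x rest =>
    intro mc mv c v hmc hmv hb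
    have hbx := hb x rest rfl
    have hsplit := (List.takeWhile_append_dropWhile
      (p := fun y => pvVowels.contains y == pvVowels.contains x) (l := rest)).symm
    have htw : ∀ y ∈ rest.takeWhile (fun y => pvVowels.contains y == pvVowels.contains x),
        pvVowels.contains y = pvVowels.contains x := by
      intro y hy
      have := List.mem_takeWhile_imp hy
      simpa using this
    have hdw : ∀ y r', rest.dropWhile (fun y => pvVowels.contains y == pvVowels.contains x)
        = y :: r' → pvVowels.contains y = !(pvVowels.contains x) := by
      intro y r' hyr
      have h := List.head?_dropWhile_not (fun y => pvVowels.contains y == pvVowels.contains x) rest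
      rw [hyr] at h
      simp only [List.head?_cons] at h
      cases hx : pvVowels.contains x <;> cases hy : pvVowels.contains y <;>
        rw [hx, hy] at h <;> revert h <;> decide
    cases hk : pvVowels.contains x with
    | false =>
      have hc : c = 0 := by rw [hk] at hbx; simpa using hbx
      subst hc
      rw [hk] at hsplit htw hdw
      have hstep : pvStepA (mc, mv, 0, v) x = (max mc (0 + 1), max mv 0, 0 + 1, 0) := by
        simp only [pvStepA]; rw [hk]; simp
      have hrun := pv_fold_cons (rest.takeWhile fun y => pvVowels.contains y == false)
        (by intro y hy; simpa using htw y hy) (max mc (0 + 1)) (max mv 0) (0 + 1)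
        (by omega) (by omega)
      have hrec := pv_main (rest.dropWhile fun y => pvVowels.contains y == false)
        (max (max mc (0 + 1)) (0 + 1 + ((rest.takeWhile fun y => pvVowels.contains y == false).length : Int)))
        (max mv 0) (0 + 1 + ((rest.takeWhile fun y => pvVowels.contains y == false).length : Int)) 0
        (by omega) (by omega)
        (by intro y r' hyr
            have hy := hdw y r' hyr
            rw [hy]; simp)
      rw [List.foldl_cons, hstep]
      conv_lhs => rw [hsplit]
      rw [List.foldl_append, hrun, hrec]
      show pvMaxRuns _ _ _ = pvMaxRuns (x :: rest) mc mv
      conv_rhs => rw [pvMaxRuns]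
      simp only [hk, Bool.false_eq_true, if_false]
      have h0 : max mv 0 = mv := max_eq_left hmv
      have hmax : max (max mc (0 + 1)) (0 + 1 + ((rest.takeWhile fun y => pvVowels.contains y == false).length : Int))
          = max mc (1 + ((rest.takeWhile fun y => pvVowels.contains y == false).length : Int)) := by
        omega
      rw [h0, hmax]
    | true =>
      have hv : v = 0 := by rw [hk] at hbx; simpa using hbx
      subst hv
      rw [hk] at hsplit htw hdw
      have hstep : pvStepA (mc, mv, c, 0) x = (max mc 0, max mv (0 + 1), 0, 0 + 1) := by
        simp only [pvStepA]; rw [hk]; simp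
      have hrun := pv_fold_vow (rest.takeWhile fun y => pvVowels.contains y == true)
        (by intro y hy; simpa using htw y hy) (max mc 0) (max mv (0 + 1)) (0 + 1)
        (by omega) (by omega)
      have hrec := pv_main (rest.dropWhile fun y => pvVowels.contains y == true)
        (max mc 0)
        (max (max mv (0 + 1)) (0 + 1 + ((rest.takeWhile fun y => pvVowels.contains y == true).length : Int)))
        0 (0 + 1 + ((rest.takeWhile fun y => pvVowels.contains y == true).length : Int))
        (by omega) (by omega)
        (by intro y r' hyr
            have hy := hdw y r' hyr
            rw [hy]; simp)
      rw [List.foldl_cons, hstep]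
      conv_lhs => rw [hsplit]
      rw [List.foldl_append, hrun, hrec]
      show pvMaxRuns _ _ _ = pvMaxRuns (x :: rest) mc mv
      conv_rhs => rw [pvMaxRuns]
      simp only [hk, if_true]
      have h0 : max mc 0 = mc := max_eq_left hmc
      have hmax : max (max mv (0 + 1)) (0 + 1 + ((rest.takeWhile fun y => pvVowels.contains y == true).length : Int))
          = max mv (1 + ((rest.takeWhile fun y => pvVowels.contains y == true).length : Int)) := by
        omega
      rw [h0, hmax]
termination_by l.length
decreasing_by all_goals (simp only [List.length_cons]; exact Nat.lt_succ_of_le (List.length_dropWhile_le _ _))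

-- structural form of A's index-based triple scan
def pvHasTriple : List Char → Bool
  | a :: b :: c :: r => (a == b && b == c) || pvHasTriple (b :: c :: r)
  | _ => false

def pvAnyNat (l : List Char) : Bool :=
  (List.range (l.length - 2)).any fun k => (l[k]? == l[k + 1]?) && (l[k + 1]? == l[k + 2]?)

theorem pv_hasTriple_cons_ne (a : Char) (l : List Char)
    (h : ∀ b r', l = b :: r' → b ≠ a) : pvHasTriple (a :: l) = pvHasTriple l := by
  match l with
  | [] => rfl
  | [b] => rfl
  | b :: c :: r =>
    have hb : (a == b) = false := by
      simp only [beq_eq_false_iff_ne]; exact fun e => h b (c :: r) rfl e.symm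
    simp [pvHasTriple, hb]

theorem pv_hasTriple_cons_cons (a : Char) (l : List Char)
    (h : ∀ b r', l = b :: r' → b ≠ a) : pvHasTriple (a :: a :: l) = pvHasTriple l := by
  match l with
  | [] => rfl
  | c :: r =>
    have hc : c ≠ a := h c r rfl
    have hac : (a == c) = false := by
      simp only [beq_eq_false_iff_ne]; exact fun e => hc e.symm
    have h2 : pvHasTriple (a :: c :: r) = pvHasTriple (c :: r) :=
      pv_hasTriple_cons_ne a (c :: r) (by intro b r' hb; injection hb with h1 _; exact h1 ▸ hc)
    rw [show pvHasTriple (a :: a :: c :: r) = ((a == a && a == c) || pvHasTriple (a :: c :: r)) from rfl,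
      h2, hac]
    simp

theorem pv_anyNat_eq (l : List Char) : pvAnyNat l = pvHasTriple l := by
  induction l with
  | nil => rfl
  | cons a tail ih =>
    match tail with
    | [] => rfl
    | [b] => rfl
    | b :: c :: r =>
      rw [show pvHasTriple (a :: b :: c :: r) = ((a == b && b == c) || pvHasTriple (b :: c :: r)) from rfl,
        ← ih]
      rw [pvAnyNat, pvAnyNat]
      simp only [List.length_cons]
      rw [show (r.length + 1 + 1 + 1 - 2) = (r.length + 1 + 1 - 2) + 1 from by omega,
        List.range_succ_eq_map]
      simp [List.any_map, Function.comp_def]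

theorem pv_idx_triple (l : List Char) :
    (PySem.List.pyRange 0 (PySem.List.len l - 2) 1).any (fun i =>
        (PySem.List.pyGet? l i == PySem.List.pyGet? l (i + 1)) &&
        (PySem.List.pyGet? l (i + 1) == PySem.List.pyGet? l (i + 2)))
      = pvHasTriple l := by
  rw [← pv_anyNat_eq, pvAnyNat]
  rw [PySem.List.pyRange_one, List.any_map]
  have hn : (PySem.List.len l - 2 - 0).toNat = l.length - 2 := by
    simp [PySem.List.len_eq]; omega
  rw [hn]
  apply List.any_congr rfl
  intro k
  simp only [Function.comp_def, zero_add]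
  have c1 : (k : Int) + 1 = ((k + 1 : Nat) : Int) := by push_cast; ring
  have c2 : (k : Int) + 2 = ((k + 2 : Nat) : Int) := by push_cast; ring
  rw [c1, c2]
  simp only [PySem.List.pyGet?_natCast]

theorem pv_triple_free (l : List Char) : pvTripleFree l = !pvHasTriple l :=
  match l with
  | [] => by simp [pvTripleFree, pvHasTriple]
  | a :: rest => by
    have hsplit := (List.takeWhile_append_dropWhile (p := fun x => x == a) (l := rest)).symm
    have hta : ∀ y ∈ rest.takeWhile (fun x => x == a), y = a := by
      intro y hy
      have := List.mem_takeWhile_imp hy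
      simpa [beq_iff_eq] using this
    have hr : ∀ b r', rest.dropWhile (fun x => x == a) = b :: r' → b ≠ a := by
      intro b r' hbr
      have h := List.head?_dropWhile_not (fun x => x == a) rest
      rw [hbr] at h
      simpa [beq_eq_false_iff_ne] using h
    rw [pvTripleFree]
    by_cases h3 : 3 ≤ 1 + (rest.takeWhile (fun x => x == a)).length
    · rw [if_pos h3]
      match ht : rest.takeWhile (fun x => x == a), h3 with
      | y1 :: y2 :: t', _ =>
        have hy1 : y1 = a := hta y1 (by rw [ht]; simp)
        have hy2 : y2 = a := hta y2 (by rw [ht]; simp)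
        rw [ht] at hsplit
        subst hy1 hy2
        rw [hsplit]
        simp [pvHasTriple]
    · rw [if_neg h3]
      rw [pv_triple_free (rest.dropWhile (fun x => x == a))]
      congr 1
      match ht : rest.takeWhile (fun x => x == a), h3 with
      | [], _ =>
        have : rest.dropWhile (fun x => x == a) = rest := by
          rw [ht] at hsplit; simpa using hsplit.symm
        rw [this]
        exact (pv_hasTriple_cons_ne a rest (by
          intro b r' hb
          exact hr b r' (by rw [this, hb]))).symm
      | [y], _ =>
        have hy : y = a := hta y (by rw [ht]; simp)
        rw [ht, hy] at hsplit
        conv_rhs => rw [hsplit, List.singleton_append]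
        exact (pv_hasTriple_cons_cons a _ hr).symm
      | y1 :: y2 :: t', h3' => exact absurd (by simp; omega) h3'
termination_by l.length
decreasing_by all_goals (simp only [List.length_cons]; exact Nat.lt_succ_of_le (List.length_dropWhile_le _ _))

-- ===== VERDICT (by name: the statement is the Claim_ definition above) =====
theorem pronounceable_heuristic_spec : Claim_equal_pronounceable_heuristic := by
  intro name K V _
  show pronounceable_heuristic name K V = pronounceable_heuristic_alt name K V
  simp only [pronounceable_heuristic, pronounceable_heuristic_alt]
  by_cases hl : name.toList = []
  · simp [hl]
  · rw [if_neg (by simpa using hl), if_neg hl]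
    have hguard : (name.toList.all fun ch => !(pvVowels.contains ch))
        = !(name.toList.any fun ch => pvVowels.contains ch) := by
      rw [List.all_eq_not_any_not]; simp
    rw [hguard]
    by_cases hv : (name.toList.any fun ch => pvVowels.contains ch) = true
    · rw [hv]
      simp only [Bool.not_true, Bool.false_eq_true, if_false]
      have hmain := pv_main (PySem.Chars.lower name.toList) 0 0 0 0 le_rfl le_rfl
        (by intro x rest _; split <;> rfl)
      have h1 := congrArg Prod.fst hmain
      have h2 := congrArg Prod.snd hmain
      simp only at h1 h2
      rw [h1, h2]
      by_cases hc : (pvMaxRuns (PySem.Chars.lower name.toList) 0 0).1 > K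
      · simp [hc]
      · by_cases hvv : (pvMaxRuns (PySem.Chars.lower name.toList) 0 0).2 > V
        · simp [hc, hvv]
        · simp only [if_neg hc, if_neg hvv]
          rw [pv_idx_triple, pv_triple_free]
          cases pvHasTriple name.toList <;> simp [le_of_not_gt hc, le_of_not_gt hvv]
    · simp only [Bool.not_eq_true] at hv
      rw [hv]
      simp
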